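-- pv_equiv track=rewrite | github.com/Dimaaap/Leetcode | Easy/1566.) Detect Pattern of Length M Repeated K or More Times.py | contains_pattern
-- ===== SOURCE A (Python) =====
-- def contains_pattern(arr: list[int], m: int, k: int):
--     seen = {}
--     for i in range(0, len(arr), m):
--         fragment = tuple(arr[i: i+m])
--         if fragment in seen:
--             seen[fragment] += 1
--         else:
--             seen[fragment] = 1
--     max_seen = max(seen.values())
--     return max_seen >= k
-- ===== SOURCE B (Python) =====
-- def contains_pattern(arr: list[int], m: int, k: int):
--     cs = [arr[i: i + m] for i in range(0, len(arr), m)]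
--     while cs:
--         head, rest = cs[0], cs[1:]
--         if 1 + sum(1 for c in rest if c == head) >= k:
--             return True
--         cs = [c for c in rest if c != head]
--     return False
-- ===== Notes on version B (the rewrite author's own statement) =====
-- stated objective: alternative
-- what changed: Replaces the dict-counter pass plus max-of-values with a worklist loop that repeatedly takes the first remaining chunk, counts its duplicates directly, early-returns on success, and partitions it away before continuing — no counting container and no max.
-- outside the precondition, e.g. on contains_pattern([], 2, 1): A raises ValueError, B returns False; on contains_pattern([1, 2], -1, 1): A raises ValueError, B returns False
import Mathlib
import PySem

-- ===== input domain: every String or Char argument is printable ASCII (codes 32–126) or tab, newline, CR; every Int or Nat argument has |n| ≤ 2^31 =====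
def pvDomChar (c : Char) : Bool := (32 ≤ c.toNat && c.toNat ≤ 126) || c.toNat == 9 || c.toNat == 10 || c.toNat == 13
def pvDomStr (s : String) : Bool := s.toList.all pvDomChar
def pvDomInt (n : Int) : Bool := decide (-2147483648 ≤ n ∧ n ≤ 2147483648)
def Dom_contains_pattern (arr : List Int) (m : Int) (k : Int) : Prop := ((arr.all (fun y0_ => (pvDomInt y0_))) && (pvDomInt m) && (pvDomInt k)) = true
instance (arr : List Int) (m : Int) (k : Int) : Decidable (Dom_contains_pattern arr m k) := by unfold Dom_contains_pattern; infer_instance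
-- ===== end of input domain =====

-- B replaces A's dict-counter pass plus max-of-values with a worklist loop that takes the first
-- remaining chunk, counts its duplicates directly (early exit), and partitions it away (objective: alternative).


-- ===== PORT A =====
def contains_pattern (arr : List Int) (m : Int) (k : Int) : Bool :=
  let seen :=
    (PySem.List.pyRange 0 arr.length m).foldl (fun (seen : PySem.Dict (List Int) Int) i =>
      let fragment := PySem.List.slice arr (some i) (some (i + m))
      match PySem.Dict.get? seen fragment with
      | some c => PySem.Dict.insert seen fragment (c + 1)
      | none => PySem.Dict.insert seen fragment 1)
      (PySem.Dict.empty : PySem.Dict (List Int) Int)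
  match PySem.List.max? (PySem.Dict.values seen) (fun v => v) with
  | some maxSeen => decide (k ≤ maxSeen)
  | none => false   -- Python raises ValueError here (empty dict); excluded by Pre_

-- ===== PORT B =====
-- the `while cs:` worklist loop of Source B, as the obvious recursion on the worklist
def pvGo (k : Int) : List (List Int) → Bool
  | [] => false
  | h :: t =>
    if k ≤ 1 + ((t.filter (fun c => c == h)).length : Int) then true
    else pvGo k (t.filter (fun c => c != h))
termination_by cs => cs.length
decreasing_by
  simp only [List.length_cons, List.length_unattach]
  exact Nat.lt_succ_of_le (le_trans (List.length_filter_le _ _) (by simp))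

def contains_pattern_alt (arr : List Int) (m : Int) (k : Int) : Bool :=
  pvGo k ((PySem.List.pyRange 0 arr.length m).map
    (fun i => PySem.List.slice arr (some i) (some (i + m))))

-- ===== PRECONDITION & SPEC =====
-- Pre_ excludes exactly the inputs on which A raises: m = 0 (range step 0, ValueError)
-- and m < 0 or arr = [] (no chunks, so max() of an empty sequence raises ValueError).
def Pre_contains_pattern (arr : List Int) (m : Int) (k : Int) : Prop := 0 < m ∧ arr ≠ []
instance (arr : List Int) (m : Int) (k : Int) : Decidable (Pre_contains_pattern arr m k) := by unfold Pre_contains_pattern; infer_instance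
def pvWitness_contains_pattern : List Int × Int × Int := ([1, 2, 1, 2], 2, 2)

def Spec_contains_pattern (arr : List Int) (m : Int) (k : Int) (out : Bool) : Prop := out = contains_pattern_alt arr m k
instance (arr : List Int) (m : Int) (k : Int) (out : Bool) : Decidable (Spec_contains_pattern arr m k out) := by unfold Spec_contains_pattern; infer_instance

-- ===== CLAIM (what is proved, stated in full; the proofs are below) =====
def Claim_equal_contains_pattern : Prop := ∀ (arr : List Int) (m : Int) (k : Int), Dom_contains_pattern arr m k → Pre_contains_pattern arr m k → Spec_contains_pattern arr m k (contains_pattern arr m k)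

-- ===== LEMMAS AND PROOFS =====

-- A's dict-building loop is the counting fold: its dict is `counter` of the chunk list.
theorem contains_pattern_dict_eq_counter (arr : List Int) (m : Int) :
    ((PySem.List.pyRange 0 arr.length m).foldl (fun (seen : PySem.Dict (List Int) Int) i =>
      let fragment := PySem.List.slice arr (some i) (some (i + m))
      match PySem.Dict.get? seen fragment with
      | some c => PySem.Dict.insert seen fragment (c + 1)
      | none => PySem.Dict.insert seen fragment 1)
      (PySem.Dict.empty : PySem.Dict (List Int) Int))
    = PySem.Dict.counter ((PySem.List.pyRange 0 arr.length m).map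
        (fun i => PySem.List.slice arr (some i) (some (i + m)))) := by
  rw [← PySem.Dict.foldl_insert_getD_add_one_eq_counter, List.foldl_map]
  congr 1
  funext d x
  simp only [PySem.Dict.getD]
  cases PySem.Dict.get? d (PySem.List.slice arr (some x) (some (x + m))) <;> rfl

-- max of the counter's values reaches k iff some chunk's count reaches k.
theorem contains_pattern_spec_aux (L : List (List Int)) (k : Int) (hL : L ≠ []) :
    (match PySem.List.max? (PySem.Dict.values (PySem.Dict.counter L)) (fun v => v) with
      | some maxSeen => decide (k ≤ maxSeen)
      | none => false)
    = L.any (fun c => decide (k ≤ (PySem.List.count L c : Int))) := by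
  have hvals : PySem.Dict.values (PySem.Dict.counter L)
      = (PySem.Set.ofList L).map (fun c => ((List.count c L : Nat) : Int)) := by
    simp [PySem.Dict.values, PySem.Dict.items_counter]
  have hvne : PySem.Dict.values (PySem.Dict.counter L) ≠ [] := by
    rw [hvals]
    cases hS : PySem.Set.ofList L with
    | nil =>
        exfalso
        cases L with
        | nil => exact hL rfl
        | cons a t =>
            have : a ∈ PySem.Set.ofList (a :: t) := by
              rw [PySem.Set.mem_ofList]; exact List.mem_cons_self
            rw [hS] at this; exact (List.not_mem_nil) this
    | cons a t => simp
  cases hmax : PySem.List.max? (PySem.Dict.values (PySem.Dict.counter L)) (fun v => v) with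
  | none => exact absurd ((PySem.List.max?_eq_none_iff _ _).1 hmax) hvne
  | some mx =>
      by_cases hk : k ≤ mx
      · have hmem := PySem.List.max?_mem hmax
        rw [hvals] at hmem
        obtain ⟨c, hc, hcv⟩ := List.mem_map.1 hmem
        have hcL := (PySem.Set.mem_ofList L c).1 hc
        simp only [hk, decide_true]
        symm
        rw [List.any_eq_true]
        refine ⟨c, hcL, decide_eq_true ?_⟩
        rw [PySem.List.count_eq, hcv]
        exact hk
      · simp only [hk, decide_false]
        symm
        rw [List.any_eq_false]
        intro c hc
        simp only [decide_eq_true_eq]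
        intro hkc
        apply hk
        have hmemv : ((List.count c L : Nat) : Int) ∈ PySem.Dict.values (PySem.Dict.counter L) := by
          rw [hvals]
          exact List.mem_map.2 ⟨c, (PySem.Set.mem_ofList L c).2 hc, rfl⟩
        have hle := PySem.List.max?_isMax hmax _ hmemv
        rw [PySem.List.count_eq] at hkc
        exact le_trans hkc hle

theorem chunks_ne_nil (arr : List Int) (m : Int) (hm : 0 < m) (ha : arr ≠ []) :
    (PySem.List.pyRange 0 arr.length m).map
      (fun i => PySem.List.slice arr (some i) (some (i + m))) ≠ [] := by
  have h0 : (0 : Int) ∈ PySem.List.pyRange 0 arr.length m := by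
    rw [PySem.List.mem_pyRange_iff_of_pos hm]
    refine ⟨le_refl _, ?_, by simp⟩
    have : 0 < arr.length := List.length_pos_of_ne_nil ha
    exact_mod_cast this
  intro h
  have := List.map_eq_nil_iff.1 h
  rw [this] at h0
  exact (List.not_mem_nil) h0

-- B's partition worklist decides "some chunk occurs at least k times".
theorem pvGo_eq_any (k : Int) (L : List (List Int)) :
    pvGo k L = L.any (fun c => decide (k ≤ (PySem.List.count L c : Int))) := by
  induction hn : L.length using Nat.strong_induction_on generalizing L with
  | _ n ih =>
    cases L with
    | nil => simp [pvGo]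
    | cons h t =>
      subst hn
      rw [pvGo]
      have hch : (PySem.List.count (h :: t) h : Int)
          = 1 + ((t.filter (fun c => c == h)).length : Int) := by
        rw [PySem.List.count_eq, List.count_cons_self, ← List.countP_eq_length_filter,
          List.count]
        push_cast; ring
      split_ifs with hk
      · symm
        rw [List.any_eq_true]
        exact ⟨h, List.mem_cons_self, decide_eq_true (by rw [hch]; exact hk)⟩
      · rw [ih (t.filter (fun c => c != h)).length
          (Nat.lt_succ_of_le (List.length_filter_le _ _)) _ rfl]
        rw [Bool.eq_iff_iff, List.any_eq_true, List.any_eq_true]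
        constructor
        · rintro ⟨c, hc, hkc⟩
          have hct := (List.mem_filter.1 hc).1
          have hne : c ≠ h := by
            have := (List.mem_filter.1 hc).2
            simpa using this
          refine ⟨c, List.mem_cons_of_mem _ hct, ?_⟩
          rw [decide_eq_true_eq] at hkc ⊢
          rw [PySem.List.count_eq] at hkc ⊢
          rw [List.count_filter (by simp [hne])] at hkc
          rwa [List.count_cons_of_ne (Ne.symm hne)]
        · rintro ⟨c, hc, hkc⟩
          rw [decide_eq_true_eq] at hkc
          rcases List.mem_cons.1 hc with rfl | hct
          · exact absurd (hch ▸ hkc) hk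
          · have hne : c ≠ h := by
              rintro rfl
              exact hk (hch ▸ hkc)
            refine ⟨c, List.mem_filter.2 ⟨hct, by simp [hne]⟩, ?_⟩
            rw [decide_eq_true_eq, PySem.List.count_eq,
              List.count_filter (by simp [hne])]
            rwa [PySem.List.count_eq, List.count_cons_of_ne (Ne.symm hne)] at hkc

-- ===== VERDICT (by name: the statement is the Claim_ definition above) =====
theorem contains_pattern_spec : Claim_equal_contains_pattern := by
  intro arr m k _ hpre
  unfold Spec_contains_pattern contains_pattern contains_pattern_alt
  rw [contains_pattern_dict_eq_counter, pvGo_eq_any]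
  exact contains_pattern_spec_aux _ k (chunks_ne_nil arr m hpre.1 hpre.2)
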